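-- pv_equiv track=rewrite | github.com/vshkodin/problem-solving-with-algorithms-and-data-structures-using-python | SplitAStringInBalancedStrings.py | func
-- ===== SOURCE A (Python) =====
-- def func(s):
--     output=0
--     balanced=[]
--     word=''
--     R=0
--     L=0
--     for i in s:
--         word+=i
--         if i == "R":
--             R+=1
--         else:
--             L+=1
--         if R == L:
--            output+=1
--            balanced.append(word)
--            word=''
--            R=0
--            L=0
--     return output, balanced
-- ===== SOURCE B (Python) =====
-- def func(s):
--     cuts = []
--     bal = 0
--     for i, c in enumerate(s):
--         bal += 1 if c == 'R' else -1
--         if bal == 0: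
--             cuts.append(i)
--     out = []
--     prev = 0
--     for cut in cuts:
--         out.append(s[prev:cut + 1])
--         prev = cut + 1
--     return len(cuts), out
-- ===== Notes on version B (the rewrite author's own statement) =====
-- stated objective: alternative
-- what changed: Replaces the char-by-char word accumulation with R/L counters and inline resets by a boundaries-then-slices shape: one pass records the indices where the running balance returns to zero, a second pass slices the string between successive boundaries.
import Mathlib
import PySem

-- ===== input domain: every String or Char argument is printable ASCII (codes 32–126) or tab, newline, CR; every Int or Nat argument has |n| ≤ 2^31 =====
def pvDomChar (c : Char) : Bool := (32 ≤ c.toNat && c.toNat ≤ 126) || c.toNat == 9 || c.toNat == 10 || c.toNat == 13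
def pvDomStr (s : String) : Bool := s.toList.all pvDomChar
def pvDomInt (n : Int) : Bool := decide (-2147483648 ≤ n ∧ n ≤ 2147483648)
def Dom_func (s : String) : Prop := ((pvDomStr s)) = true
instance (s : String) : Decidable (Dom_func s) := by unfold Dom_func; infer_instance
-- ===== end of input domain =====

-- B replaces A's char-by-char word accumulation with a boundaries-then-slices decomposition (alternative structure, same cost).

-- ===== PORT A =====
def funcStepA (st : Int × List String × List Char × Int × Int) (c : Char) :
    Int × List String × List Char × Int × Int :=
  let (output, balanced, word, R, L) := st
  let word := word ++ [c]
  let (R, L) := if c = 'R' then (R + 1, L) else (R, L + 1)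
  if R = L then (output + 1, balanced ++ [String.ofList word], [], 0, 0)
  else (output, balanced, word, R, L)

def func (s : String) : Int × List String :=
  let st := s.toList.foldl funcStepA (0, [], [], 0, 0)
  (st.1, st.2.1)

-- ===== PORT B =====
def cutStep (st : Int × List Int) (p : Int × Char) : Int × List Int :=
  let bal := st.1 + (if p.2 = 'R' then 1 else -1)
  (bal, if bal = 0 then st.2 ++ [p.1] else st.2)

def sliceStep (cs : List Char) (st : Int × List String) (cut : Int) : Int × List String :=
  (cut + 1, st.2 ++ [String.ofList (PySem.List.slice cs (some st.1) (some (cut + 1)))])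

def func_alt (s : String) : Int × List String :=
  let cs := s.toList
  let cuts := ((PySem.List.enumerate cs 0).foldl cutStep (0, [])).2
  let out := (cuts.foldl (sliceStep cs) (0, [])).2
  ((cuts.length : Int), out)

-- ===== PRECONDITION & SPEC =====
def Spec_func (s : String) (out : Int × List String) : Prop := out = func_alt s
instance (s : String) (out : Int × List String) : Decidable (Spec_func s out) := by unfold Spec_func; infer_instance

-- ===== CLAIM (what is proved, stated in full; the proofs are below) =====
def Claim_equal_func : Prop := ∀ (s : String), Dom_func s → Spec_func s (func s)

-- ===== LEMMAS AND PROOFS =====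

/-- +1 for 'R', -1 otherwise. -/
def pvVal (c : Char) : Int := if c = 'R' then 1 else -1

/-- Reference: the completed balanced segments, carrying the current word and its balance. -/
def pvRun : List Char → List Char → Int → List (List Char)
  | [], _, _ => []
  | c :: rest, w, bal =>
    if bal + pvVal c = 0 then (w ++ [c]) :: pvRun rest [] 0
    else pvRun rest (w ++ [c]) (bal + pvVal c)

/-- Reference: the absolute indices (from position n) where the running balance hits zero. -/
def pvCuts : List Char → Int → Nat → List Int
  | [], _, _ => []
  | c :: rest, bal, n =>
    (if bal + pvVal c = 0 then [(n : Int)] else []) ++ pvCuts rest (bal + pvVal c) (n + 1)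

theorem pvA_fold (cs : List Char) : ∀ (o : Int) (b : List String) (w : List Char) (R L : Int),
    (cs.foldl funcStepA (o, b, w, R, L)).1 = o + (pvRun cs w (R - L)).length ∧
    (cs.foldl funcStepA (o, b, w, R, L)).2.1 = b ++ (pvRun cs w (R - L)).map String.ofList := by
  induction cs with
  | nil => intro o b w R L; simp [pvRun]
  | cons c rest ih =>
    intro o b w R L
    simp only [List.foldl_cons, funcStepA]
    by_cases hc : c = 'R'
    · simp only [hc, if_true]
      by_cases hz : (R : Int) + 1 = L
      · rw [if_pos hz]
        have hrun : pvRun ('R' :: rest) w (R - L) = (w ++ ['R']) :: pvRun rest [] 0 := by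
          rw [pvRun, if_pos (by simp [pvVal]; omega)]
        rw [hrun]
        obtain ⟨h1, h2⟩ := ih (o + 1) (b ++ [String.ofList (w ++ ['R'])]) [] 0 0
        rw [show (0 : Int) - 0 = 0 from by ring] at h1 h2
        constructor
        · rw [h1, List.length_cons]; push_cast; ring
        · rw [h2]; simp
      · rw [if_neg hz]
        have hrun : pvRun ('R' :: rest) w (R - L) = pvRun rest (w ++ ['R']) (R - L + 1) := by
          rw [pvRun, if_neg (by simp [pvVal]; omega)]
          simp [pvVal]
        rw [hrun]
        simpa [show (R : Int) + 1 - L = R - L + 1 from by ring] using ih o b (w ++ ['R']) (R + 1) L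
    · simp only [if_neg hc]
      by_cases hz : (R : Int) = L + 1
      · rw [if_pos hz]
        have hrun : pvRun (c :: rest) w (R - L) = (w ++ [c]) :: pvRun rest [] 0 := by
          rw [pvRun, if_pos (by simp [pvVal, hc]; omega)]
        rw [hrun]
        obtain ⟨h1, h2⟩ := ih (o + 1) (b ++ [String.ofList (w ++ [c])]) [] 0 0
        rw [show (0 : Int) - 0 = 0 from by ring] at h1 h2
        constructor
        · rw [h1, List.length_cons]; push_cast; ring
        · rw [h2]; simp
      · rw [if_neg hz]
        have hrun : pvRun (c :: rest) w (R - L) = pvRun rest (w ++ [c]) (R - L + -1) := by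
          rw [pvRun, if_neg (by simp [pvVal, hc]; omega)]
          simp [pvVal, hc]
        rw [hrun]
        simpa [show (R : Int) - (L + 1) = R - L + -1 from by ring] using ih o b (w ++ [c]) R (L + 1)

theorem pvB_pass1 (cs : List Char) : ∀ (n : Nat) (bal : Int) (acc : List Int),
    ((PySem.List.enumerate cs (n : Int)).foldl cutStep (bal, acc)).2 = acc ++ pvCuts cs bal n := by
  induction cs with
  | nil => intro n bal acc; simp [PySem.List.enumerate_nil, pvCuts]
  | cons c rest ih =>
    intro n bal acc
    rw [PySem.List.enumerate_cons, List.foldl_cons]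
    have hstep : cutStep (bal, acc) ((n : Int), c)
        = (bal + pvVal c, if bal + pvVal c = 0 then acc ++ [(n : Int)] else acc) := by
      simp [cutStep, pvVal]
    rw [hstep, show ((n : Int) + 1) = ((n + 1 : Nat) : Int) from by push_cast; ring]
    by_cases hz : bal + pvVal c = 0
    · rw [if_pos hz, ih (n + 1), pvCuts, if_pos hz]
      simp
    · rw [if_neg hz, ih (n + 1), pvCuts, if_neg hz]
      simp

theorem pvB_pass2 (full : List Char) : ∀ (cs w : List Char) (bal : Int) (n : Nat) (acc : List String),
    w.length ≤ n → full.drop (n - w.length) = w ++ cs →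
    ((pvCuts cs bal n).foldl (sliceStep full) (((n - w.length : Nat) : Int), acc)).2
      = acc ++ (pvRun cs w bal).map String.ofList := by
  intro cs
  induction cs with
  | nil => intro w bal n acc _ _; simp [pvCuts, pvRun]
  | cons c rest ih =>
    intro w bal n acc hle hdrop
    by_cases hz : bal + pvVal c = 0
    · have hlen : w.length + 1 = (w ++ [c]).length := by
        simp
      have hslice : PySem.List.slice full (some ((n - w.length : Nat) : Int)) (some ((n : Int) + 1))
          = w ++ [c] := by
        rw [show ((n : Int) + 1) = ((n + 1 : Nat) : Int) from by push_cast; ring,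
          PySem.List.slice_natCast, hdrop,
          show n + 1 - (n - w.length) = w.length + 1 from by omega,
          show w ++ c :: rest = (w ++ [c]) ++ rest from by simp, hlen, List.take_left]
      have hdrop2 : full.drop (n - w.length) = (w ++ [c]) ++ rest := by rw [hdrop]; simp
      have hdrop' : full.drop (n + 1) = rest := by
        have h := congrArg (List.drop (w ++ [c]).length) hdrop2
        rw [List.drop_drop, List.drop_left] at h
        convert h using 2
        simp only [List.length_append, List.length_cons, List.length_nil]
        omega
      rw [pvCuts, if_pos hz, hz, List.foldl_append]
      simp only [List.foldl_cons, List.foldl_nil, sliceStep, hslice]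
      have hcast : ((n : Int) + 1) = ((n + 1 - ([] : List Char).length : Nat) : Int) := by
        simp
      rw [hcast, ih [] 0 (n + 1) (acc ++ [String.ofList (w ++ [c])]) (by simp) (by simpa using hdrop')]
      rw [pvRun, if_pos hz]
      simp
    · have hdrop' : full.drop (n + 1 - (w ++ [c]).length) = (w ++ [c]) ++ rest := by
        rw [show n + 1 - (w ++ [c]).length = n - w.length from by
            simp only [List.length_append, List.length_cons, List.length_nil]
            omega,
          hdrop]
        simp
      have hcast : ((n - w.length : Nat) : Int) = ((n + 1 - (w ++ [c]).length : Nat) : Int) := by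
        congr 1
        simp only [List.length_append, List.length_cons, List.length_nil]
        omega
      have hle' : (w ++ [c]).length ≤ n + 1 := by
        simp only [List.length_append, List.length_cons, List.length_nil]
        omega
      rw [pvCuts, if_neg hz, List.nil_append, hcast,
        ih (w ++ [c]) (bal + pvVal c) (n + 1) acc hle' hdrop']
      rw [pvRun, if_neg hz]

theorem pvCuts_length (cs : List Char) : ∀ (bal : Int) (n : Nat) (w : List Char),
    (pvCuts cs bal n).length = (pvRun cs w bal).length := by
  induction cs with
  | nil => intro bal n w; simp [pvCuts, pvRun]
  | cons c rest ih =>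
    intro bal n w
    by_cases hz : bal + pvVal c = 0 <;>
      simp [pvCuts, pvRun, hz, ih (bal + pvVal c) (n + 1) (w ++ [c]), ih 0 (n + 1) []]

-- ===== VERDICT (by name: the statement is the Claim_ definition above) =====
theorem func_spec : Claim_equal_func := by
  intro s _
  unfold Spec_func func func_alt
  obtain ⟨h1, h2⟩ := pvA_fold s.toList 0 [] [] 0 0
  rw [show (0 : Int) - 0 = 0 from by ring] at h1 h2
  have hp1 := pvB_pass1 s.toList 0 0 []
  rw [Nat.cast_zero] at hp1
  have hp2 := pvB_pass2 s.toList s.toList [] 0 0 [] (by simp) (by simp)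
  simp only [List.length_nil, Nat.sub_zero, Nat.cast_zero, List.nil_append] at hp1 hp2
  refine Prod.ext ?_ ?_
  · simp only [h1, hp1, pvCuts_length s.toList 0 0 []]
    ring
  · simp only [h2, hp1, hp2, List.nil_append]
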